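-- pv_equiv track=rewrite | github.com/chongliw/algorithm_py | fun/mostfrequentchar.py | most_freq
-- ===== SOURCE A (Python) =====
-- def most_freq(str, n):
--     dict = {}
--     punc = [' ', ',', '.', '-', '?', ';' , ':']
--     for char in str:
--         if not char in punc:
--             if char in dict:
--                 dict[char] += 1
--             else:
--                 dict[char] = 1
--     keys = []
--     for key in dict:
--         if dict[key] >= n:
--             keys.append(key)
--     keys.sort()
--     skey = ""
--     for char in keys:
--         skey += char
--     return skey
-- ===== SOURCE B (Python) =====
-- def most_freq(str, n):
--     punc = {' ', ',', '.', '-', '?', ';', ':'}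
--     s = sorted(c for c in str if c not in punc)
--     out = []
--     i = 0
--     while i < len(s):
--         j = i + 1
--         while j < len(s) and s[j] == s[i]:
--             j += 1
--         if j - i >= n:
--             out.append(s[i])
--         i = j
--     return ''.join(out)
-- ===== Notes on version B (the rewrite author's own statement) =====
-- stated objective: alternative
-- what changed: A counts frequencies in a dict, filters keys, sorts the survivors and concatenates; B keeps no frequency table at all: it sorts the non-punctuation characters first and then makes one run-length scan over the sorted list, emitting a character when its contiguous run has length >= n, so the output is produced already in order.
import Mathlib
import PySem

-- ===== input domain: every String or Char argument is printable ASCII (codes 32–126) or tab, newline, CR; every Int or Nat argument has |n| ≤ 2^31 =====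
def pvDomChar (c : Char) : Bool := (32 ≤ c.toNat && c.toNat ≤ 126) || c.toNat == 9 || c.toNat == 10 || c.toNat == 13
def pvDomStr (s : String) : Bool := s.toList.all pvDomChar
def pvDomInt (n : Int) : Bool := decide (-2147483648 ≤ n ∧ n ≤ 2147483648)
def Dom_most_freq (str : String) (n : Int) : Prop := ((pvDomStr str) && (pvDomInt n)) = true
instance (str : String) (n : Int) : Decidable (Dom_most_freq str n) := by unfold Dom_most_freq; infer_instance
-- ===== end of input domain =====

-- B keeps no frequency table: it sorts the non-punctuation characters and emits each
-- character whose contiguous run in the sorted list has length >= n (alternative algorithm).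

-- ===== PORT A =====
-- A's string accumulation 'skey += char' is ported at the List Char level and converted
-- with String.ofList at the end (exact: a Python string is the sequence of its characters).
def most_freq (str : String) (n : Int) : String :=
  let punc : List Char := [' ', ',', '.', '-', '?', ';', ':']
  let d : PySem.Dict Char Int :=
    str.toList.foldl (fun d char =>
      if !punc.contains char then
        (if d.contains char then d.modify char 0 (· + 1) else d.insert char 1)
      else d) PySem.Dict.empty
  let keys : List Char :=
    d.keys.foldl (fun keys key => if n ≤ d.getD key 0 then keys ++ [key] else keys) []
  let keys := PySem.List.sorted keys (fun x => x) false
  String.ofList (keys.foldl (fun skey char => skey ++ [char]) [])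

-- ===== PORT B =====
-- B's inner while loop 'advance j past the run of s[i]' is takeWhile/dropWhile of the
-- head's run; the outer while loop is this structural recursion on the remaining list.
def runScan (n : Int) : List Char → List Char
  | [] => []
  | c :: rest =>
      (if n ≤ (1 + ((rest.takeWhile (· == c)).length : Int)) then [c] else [])
        ++ runScan n (rest.dropWhile (· == c))
termination_by l => l.length
decreasing_by simpa using Nat.lt_succ_of_le (List.length_dropWhile_le _ _)

def most_freq_alt (str : String) (n : Int) : String :=
  let punc : List Char := [' ', ',', '.', '-', '?', ';', ':']
  let s := PySem.List.sorted (str.toList.filter (fun c => !punc.contains c)) (fun x => x) false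
  String.ofList (runScan n s)

-- ===== PRECONDITION & SPEC =====
def Spec_most_freq (str : String) (n : Int) (out : String) : Prop := out = most_freq_alt str n
instance (str : String) (n : Int) (out : String) : Decidable (Spec_most_freq str n out) := by unfold Spec_most_freq; infer_instance

-- ===== CLAIM (what is proved, stated in full; the proofs are below) =====
def Claim_equal_most_freq : Prop := ∀ (str : String) (n : Int), Dom_most_freq str n → Spec_most_freq str n (most_freq str n)

-- ===== LEMMAS AND PROOFS =====

-- A's per-character dict update is exactly Counter's update step.
theorem dict_step_eq_modify (d : PySem.Dict Char Int) (c : Char) :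
    (if d.contains c then d.modify c 0 (· + 1) else d.insert c 1) = d.modify c 0 (· + 1) := by
  by_cases h : d.contains c
  · simp [h]
  · have h2 : d.get? c = none := (PySem.Dict.get?_eq_none_iff_contains d c).2 (by simp [h])
    simp [h, PySem.Dict.modify, PySem.Dict.getD, h2]

-- A's dict-building loop is Counter of the non-punctuation characters.
theorem dict_fold_eq_counter (punc : List Char) (l : List Char) :
    l.foldl (fun d char =>
      if !punc.contains char then
        (if d.contains char then d.modify char 0 (· + 1) else d.insert char 1)
      else d) PySem.Dict.empty
    = PySem.Dict.counter (l.filter (fun c => !punc.contains c)) := by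
  rw [PySem.Dict.counter_eq_foldl]
  generalize PySem.Dict.empty = d
  induction l generalizing d with
  | nil => rfl
  | cons x xs ih =>
    by_cases h : x ∈ punc
    · simpa [h, List.filter_cons] using ih _
    · simpa [h, List.filter_cons, dict_step_eq_modify] using ih _

-- A's keys-collecting loop is a filter.
theorem keys_fold_eq_filter (d : PySem.Dict Char Int) (n : Int) (l : List Char) (acc : List Char) :
    l.foldl (fun keys key => if n ≤ d.getD key 0 then keys ++ [key] else keys) acc
    = acc ++ l.filter (fun key => decide (n ≤ d.getD key 0)) := by
  induction l generalizing acc with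
  | nil => simp
  | cons x xs ih => by_cases h : n ≤ d.getD x 0 <;> simp [h, ih]

-- on a ≤-chain c :: rest, the whole run of c is at the front: takeWhile captures all copies.
theorem takeWhile_length_eq_count (c : Char) (rest : List Char)
    (hall : ∀ x ∈ rest, c ≤ x) (hp : rest.Pairwise (· ≤ ·)) :
    (rest.takeWhile (· == c)).length = rest.count c := by
  induction rest with
  | nil => rfl
  | cons d t ih =>
    rcases List.pairwise_cons.1 hp with ⟨hd, ht⟩
    by_cases hdc : d = c
    · subst hdc
      rw [List.takeWhile_cons_of_pos (by simp)]
      simp [ih (fun x hx => hall x (List.mem_cons_of_mem d hx)) ht]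
    · have hcd : c < d := lt_of_le_of_ne (hall d (List.mem_cons_self)) (fun e => hdc e.symm)
      have hnot : c ∉ d :: t := by
        intro hmem
        rcases List.mem_cons.1 hmem with h | h
        · exact hdc h.symm
        · exact absurd (hd c h) (not_le.2 hcd)
      rw [List.takeWhile_cons_of_neg (by simp [hdc])]
      simp [List.count_eq_zero.2 hnot]

-- on a ≤-chain c :: rest, everything left after dropping the run of c is strictly above c.
theorem lt_of_mem_dropWhile (c : Char) (rest : List Char)
    (hall : ∀ x ∈ rest, c ≤ x) (hp : rest.Pairwise (· ≤ ·)) :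
    ∀ a ∈ rest.dropWhile (· == c), c < a := by
  induction rest with
  | nil => simp
  | cons d t ih =>
    rcases List.pairwise_cons.1 hp with ⟨hd, ht⟩
    intro a ha
    by_cases hdc : d = c
    · subst hdc
      rw [List.dropWhile_cons_of_pos (by simp)] at ha
      exact ih (fun x hx => hall x (List.mem_cons_of_mem d hx)) ht a ha
    · rw [List.dropWhile_cons_of_neg (by simp [hdc])] at ha
      have hcd : c < d := lt_of_le_of_ne (hall d (List.mem_cons_self)) (fun e => hdc e.symm)
      rcases List.mem_cons.1 ha with h | h
      · exact h ▸ hcd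
      · exact lt_of_lt_of_le hcd (hd a h)

-- counts and membership away from c pass to the dropWhile tail.
theorem count_dropWhile_eq (c a : Char) (rest : List Char) (hne : a ≠ c) :
    (rest.dropWhile (· == c)).count a = rest.count a := by
  conv_rhs => rw [← List.takeWhile_append_dropWhile (p := (· == c)) (l := rest)]
  rw [List.count_append]
  have h0 : (rest.takeWhile (· == c)).count a = 0 := by
    refine List.count_eq_zero.2 (fun hmem => ?_)
    have := List.mem_takeWhile_imp hmem
    simp at this
    exact hne this
  omega

theorem mem_dropWhile_iff (c a : Char) (rest : List Char) (hne : a ≠ c) :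
    a ∈ rest.dropWhile (· == c) ↔ a ∈ rest := by
  conv_rhs => rw [← List.takeWhile_append_dropWhile (p := (· == c)) (l := rest)]
  rw [List.mem_append]
  constructor
  · exact Or.inr
  · rintro (h | h)
    · have := List.mem_takeWhile_imp h
      simp at this
      exact absurd this hne
    · exact h

-- membership in the run scan of a ≤-chain: the element occurs and its count meets n.
theorem mem_runScan (n : Int) (m : List Char) (hp : m.Pairwise (· ≤ ·)) (a : Char) :
    a ∈ runScan n m ↔ a ∈ m ∧ n ≤ (m.count a : Int) := by
  induction m using runScan.induct with
  | case1 => simp [runScan]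
  | case2 c rest ih =>
    rcases List.pairwise_cons.1 hp with ⟨hall, ht⟩
    have hdrop_pw : (rest.dropWhile (· == c)).Pairwise (· ≤ ·) :=
      List.Pairwise.sublist (List.dropWhile_sublist _) ht
    have ih' := ih hdrop_pw
    rw [runScan, List.mem_append]
    by_cases hac : a = c
    · subst hac
      have hnot : a ∉ rest.dropWhile (· == a) := fun h =>
        absurd (lt_of_mem_dropWhile a rest hall ht a h) (lt_irrefl a)
      have : a ∉ runScan n (rest.dropWhile (· == a)) := fun h => hnot (ih'.1 h).1
      rw [takeWhile_length_eq_count a rest hall ht]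
      by_cases hn : n ≤ (1 + (rest.count a : Int))
      · simp [hn, this, List.count_cons_self]
        omega
      · simp [hn, this, List.count_cons_self]
        omega
    · have h1 : a ∉ (if n ≤ (1 + ((rest.takeWhile (· == c)).length : Int)) then [c] else []) := by
        split <;> simp [hac]
      have hca : ¬ (c = a) := fun e => hac e.symm
      simp only [List.mem_cons, List.count_cons]
      rw [ih', count_dropWhile_eq c a rest hac, mem_dropWhile_iff c a rest hac]
      constructor
      · rintro (h | h)
        · exact absurd h h1
        · exact ⟨Or.inr h.1, by simp [hca]; exact_mod_cast h.2⟩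
      · rintro ⟨h, hc⟩
        rcases h with h | h
        · exact absurd h hac
        · refine Or.inr ⟨h, ?_⟩
          simp [hca] at hc
          exact_mod_cast hc

-- the run scan of a ≤-chain is strictly increasing.
theorem pairwise_lt_runScan (n : Int) (m : List Char) (hp : m.Pairwise (· ≤ ·)) :
    (runScan n m).Pairwise (· < ·) := by
  induction m using runScan.induct with
  | case1 => simp [runScan]
  | case2 c rest ih =>
    rcases List.pairwise_cons.1 hp with ⟨hall, ht⟩
    have hdrop_pw : (rest.dropWhile (· == c)).Pairwise (· ≤ ·) :=
      List.Pairwise.sublist (List.dropWhile_sublist _) ht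
    have hrec := ih hdrop_pw
    have hmem : ∀ a ∈ runScan n (rest.dropWhile (· == c)), c < a := fun a ha =>
      lt_of_mem_dropWhile c rest hall ht a ((mem_runScan n _ hdrop_pw a).1 ha).1
    rw [runScan]
    split
    · exact List.pairwise_cons.2 ⟨hmem, hrec⟩
    · simpa using hrec

-- the heart: sort-then-run-scan names exactly the sorted list of qualifying characters.
theorem sorted_filter_eq_runScan (n : Int) (l : List Char) :
    PySem.List.sorted ((PySem.Set.ofList l).filter
        (fun k => decide (n ≤ ((l.count k : Int))))) (fun x => x) false
    = runScan n (PySem.List.sorted l (fun x => x) false) := by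
  have hpw : (PySem.List.sorted l (fun x => x) false).Pairwise (· ≤ ·) := by
    simpa using PySem.List.sorted_pairwise l (fun x => x)
  have hperm : (PySem.List.sorted l (fun x => x) false).Perm l := PySem.List.sorted_perm l (fun x => x) false
  refine PySem.List.sorted_eq_of_perm_of_pairwise_lt _ _ (fun x => x) ?_ ?_
  · rw [List.perm_ext_iff_of_nodup
      (List.Pairwise.imp ne_of_lt (pairwise_lt_runScan n _ hpw))
      ((PySem.Set.nodup_ofList l).filter _)]
    intro a
    rw [mem_runScan n _ hpw a, List.mem_filter, PySem.Set.mem_ofList,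
      hperm.mem_iff, hperm.count_eq]
    simp
  · simpa using pairwise_lt_runScan n _ hpw

theorem most_freq_eq (str : String) (n : Int) : most_freq str n = most_freq_alt str n := by
  unfold most_freq most_freq_alt
  simp only []
  rw [dict_fold_eq_counter, keys_fold_eq_filter, PySem.Dict.keys_counter]
  simp only [PySem.Dict.getD_counter, PySem.List.foldl_append_singleton_eq_map (fun x => x),
    List.map_id', List.nil_append]
  exact congrArg String.ofList (sorted_filter_eq_runScan n _)

-- ===== VERDICT (by name: the statement is the Claim_ definition above) =====
theorem most_freq_spec : Claim_equal_most_freq := by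
  intro str n _
  unfold Spec_most_freq
  exact most_freq_eq str n
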